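-- pv_equiv track=rewrite | github.com/felipemalbergier/ITC-DataMinig | data_manipulation.py | rejoin_possible_tokens
-- ===== SOURCE A (Python) =====
-- IGNORED_SYMBOLS = ["&", "#"]
--
-- def rejoin_possible_tokens(tokens):
--     i_offset = 0
--     for i, t in enumerate(tokens):
--         i -= i_offset
--         if (t in IGNORED_SYMBOLS or tokens[i - 1][-1] in IGNORED_SYMBOLS) and i > 0:
--             left = tokens[:i - 1]
--             joined = [tokens[i - 1] + t]
--             right = tokens[i + 1:]
--             tokens = left + joined + right
--             i_offset += 1
--     return tokens
-- ===== SOURCE B (Python) =====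
-- IGNORED_SYMBOLS = ["&", "#"]
--
-- def rejoin_possible_tokens(tokens):
--     out = []
--     for t in tokens:
--         if out and (t in IGNORED_SYMBOLS or out[-1][-1] in IGNORED_SYMBOLS):
--             out[-1] += t
--         else:
--             out.append(t)
--     return out
-- ===== Notes on version B (the rewrite author's own statement) =====
-- stated objective: simpler
-- what changed: A repeatedly rebuilds the whole token list (slice + concatenate) for every merge while re-indexing with an offset; B does a single forward pass that either appends each token or merges it into the last element of the output list.
-- outside the precondition, e.g. on rejoin_possible_tokens(['&', '']): A returns ['&'], B returns ['&']; on rejoin_possible_tokens(['a', '']): A raises IndexError, B returns ['a', '']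
import Mathlib
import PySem

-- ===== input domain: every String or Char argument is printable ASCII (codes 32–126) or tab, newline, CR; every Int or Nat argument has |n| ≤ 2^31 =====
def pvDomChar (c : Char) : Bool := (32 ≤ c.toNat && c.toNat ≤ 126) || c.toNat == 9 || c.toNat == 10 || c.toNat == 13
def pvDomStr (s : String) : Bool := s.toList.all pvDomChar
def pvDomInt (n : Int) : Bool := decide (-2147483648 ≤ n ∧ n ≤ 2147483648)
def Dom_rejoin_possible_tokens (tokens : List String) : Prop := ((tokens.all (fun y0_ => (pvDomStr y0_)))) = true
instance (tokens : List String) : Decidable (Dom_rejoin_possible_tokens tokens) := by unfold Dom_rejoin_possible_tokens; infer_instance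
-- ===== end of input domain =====

-- B replaces A's offset-tracking list rebuilding (slice + concatenate on every merge) with a single
-- forward pass that appends each token or merges it into the last output element (objective: simpler).

-- ===== PORT A =====
-- t in IGNORED_SYMBOLS  (IGNORED_SYMBOLS = ["&", "#"])
def pvIgnStr (s : String) : Bool := s == "&" || s == "#"
-- c in IGNORED_SYMBOLS for a 1-character string c = tokens[i-1][-1]
def pvIgnChar (c : Char) : Bool := c == '&' || c == '#'
-- last character s[-1]; Python raises IndexError on "" (excluded by Pre_), the default is never read there
def pvLastIgn (s : String) : Bool :=
  match PySem.Str.pyGet? s (-1) with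
  | some c => pvIgnChar c
  | none => false

-- the for-loop: enum walks the ORIGINAL list (Python's enumerate iterator is fixed at loop entry),
-- cur is the rebound `tokens`, off is i_offset
def pvALoop (cur : List String) (off : Int) (enum : List (Int × String)) : List String :=
  match enum with
  | [] => cur
  | (i, t) :: rest =>
    let i' := i - off
    let prev := (PySem.List.pyGet? cur (i' - 1)).getD ""
    if (pvIgnStr t || pvLastIgn prev) && decide (0 < i') then
      pvALoop (PySem.List.slice cur none (some (i' - 1)) ++ [prev ++ t]
               ++ PySem.List.slice cur (some (i' + 1)) none) (off + 1) rest
    else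
      pvALoop cur off rest

def rejoin_possible_tokens (tokens : List String) : List String :=
  pvALoop tokens 0 (PySem.List.enumerate tokens 0)

-- ===== PORT B =====
def pvBStep (out : List String) (t : String) : List String :=
  if (!out.isEmpty) && (pvIgnStr t || pvLastIgn (out.getLast?.getD "")) then
    out.dropLast ++ [out.getLast?.getD "" ++ t]
  else
    out ++ [t]

def rejoin_possible_tokens_alt (tokens : List String) : List String :=
  tokens.foldl pvBStep []

-- ===== PRECONDITION & SPEC =====
-- Pre_ excludes lists containing an empty-string token: on those A's `[-1]` indexing raises
-- IndexError except in accidental merge cases where A happens to return (see claim cites).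
def Pre_rejoin_possible_tokens (tokens : List String) : Prop := ∀ s ∈ tokens, s ≠ ""
instance (tokens : List String) : Decidable (Pre_rejoin_possible_tokens tokens) := by
  unfold Pre_rejoin_possible_tokens; infer_instance
def pvWitness_rejoin_possible_tokens : List String := ["foo", "&", "bar"]

def Spec_rejoin_possible_tokens (tokens : List String) (out : List String) : Prop := out = rejoin_possible_tokens_alt tokens
instance (tokens : List String) (out : List String) : Decidable (Spec_rejoin_possible_tokens tokens out) := by unfold Spec_rejoin_possible_tokens; infer_instance

-- ===== CLAIM (what is proved, stated in full; the proofs are below) =====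
def Claim_equal_rejoin_possible_tokens : Prop := ∀ (tokens : List String), Dom_rejoin_possible_tokens tokens → Pre_rejoin_possible_tokens tokens → Spec_rejoin_possible_tokens tokens (rejoin_possible_tokens tokens)

-- ===== LEMMAS AND PROOFS =====

lemma pv_append_ne_empty (s t : String) (hs : s ≠ "") : s ++ t ≠ "" := by
  intro h
  apply hs
  have := congrArg String.toList h
  simp at this
  cases this with
  | intro h1 h2 => exact h1

-- main invariant: A's loop on cur = out ++ rest with off = i - out.length
-- computes exactly B's fold over rest starting from out
lemma pv_loop_eq (rest : List String) : ∀ (out : List String) (i : Int),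
    (∀ s ∈ out, s ≠ "") → (∀ s ∈ rest, s ≠ "") →
    pvALoop (out ++ rest) (i - out.length) (PySem.List.enumerate rest i)
      = rest.foldl pvBStep out := by
  induction rest with
  | nil => intro out i _ _; simp [pvALoop, PySem.List.enumerate]
  | cons t r ih =>
    intro out i hout hrest
    rw [PySem.List.enumerate_cons]
    have ht : t ≠ "" := hrest t (by simp)
    have hr : ∀ s ∈ r, s ≠ "" := fun s hs => hrest s (by simp [hs])
    rw [pvALoop]
    have hi' : i - (i - (out.length : Int)) = (out.length : Int) := by omega
    simp only [hi']
    rcases out.eq_nil_or_concat' with hnil | ⟨os, o, hcc⟩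
    · subst hnil
      simp only [List.length_nil, Nat.cast_zero, List.nil_append]
      rw [if_neg (by simp)]
      have := ih [t] (i + 1) (by intro s hs; simp at hs; subst hs; exact ht) hr
      simp only [List.singleton_append, List.length_cons, List.length_nil] at this
      have harith : i + 1 - ((0 + 1 : Nat) : Int) = i - 0 := by push_cast; omega
      rw [harith] at this
      rw [this]
      simp [pvBStep]
    · subst hcc
      have ho : o ≠ "" := hout o (by simp)
      have hlen : ((os ++ [o]).length : Int) = (os.length : Int) + 1 := by
        simp
      have hm1 : ((os ++ [o]).length : Int) - 1 = ((os.length : Nat) : Int) := by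
        rw [hlen]; omega
      have hp1 : ((os ++ [o]).length : Int) + 1 = ((os.length + 2 : Nat) : Int) := by
        rw [hlen]; push_cast; omega
      have hassoc : (os ++ [o]) ++ t :: r = os ++ (o :: t :: r) := by simp
      have hget : (PySem.List.pyGet? ((os ++ [o]) ++ t :: r) (((os ++ [o]).length : Int) - 1)).getD ""
          = o := by
        rw [hm1, hassoc, PySem.List.pyGet?_natCast]
        simp
      have hpos : decide ((0:Int) < ((os ++ [o]).length : Int)) = true := by
        rw [hlen]; simp
      rw [hget, hpos, Bool.and_true]
      cases hc : (pvIgnStr t || pvLastIgn o) with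
      | true =>
        rw [if_pos rfl]
        have hsl1 : PySem.List.slice ((os ++ [o]) ++ t :: r) none (some (((os ++ [o]).length : Int) - 1))
            = os := by
          rw [hm1, PySem.List.slice_to_natCast, hassoc]
          exact List.take_left
        have hsl2 : PySem.List.slice ((os ++ [o]) ++ t :: r) (some (((os ++ [o]).length : Int) + 1)) none
            = r := by
          rw [hp1, PySem.List.slice_from_natCast, hassoc]
          simp [List.drop_append]
        rw [hsl1, hsl2]
        have hout' : ∀ s ∈ os ++ [o ++ t], s ≠ "" := by
          intro s hs
          rcases List.mem_append.mp hs with h | h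
          · exact hout s (by simp [h])
          · simp at h; subst h; exact pv_append_ne_empty o t ho
        have := ih (os ++ [o ++ t]) (i + 1) hout' hr
        have harith : i + 1 - (((os ++ [o ++ t]).length : Nat) : Int)
            = i - ((os ++ [o]).length : Int) + 1 := by
          simp; omega
        rw [harith] at this
        rw [List.append_assoc, List.singleton_append] at this
        rw [show os ++ [o ++ t] ++ r = os ++ (o ++ t) :: r by simp]
        rw [this]
        simp [pvBStep, hc]
      | false =>
        rw [if_neg (by simp)]
        have hout' : ∀ s ∈ (os ++ [o]) ++ [t], s ≠ "" := by
          intro s hs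
          rcases List.mem_append.mp hs with h | h
          · exact hout s h
          · simp at h; subst h; exact ht
        have := ih ((os ++ [o]) ++ [t]) (i + 1) hout' hr
        have harith : i + 1 - ((((os ++ [o]) ++ [t]).length : Nat) : Int)
            = i - ((os ++ [o]).length : Int) := by
          simp; omega
        rw [harith] at this
        rw [List.append_assoc ((os ++ [o])) [t] r] at this
        simp only [List.singleton_append] at this
        rw [this]
        simp [pvBStep, hc]

-- ===== VERDICT (by name: the statement is the Claim_ definition above) =====
theorem rejoin_possible_tokens_spec : Claim_equal_rejoin_possible_tokens := by
  intro tokens _ hpre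
  unfold Spec_rejoin_possible_tokens rejoin_possible_tokens rejoin_possible_tokens_alt
  have := pv_loop_eq tokens [] 0 (by intro s hs; simp at hs) hpre
  simpa using this
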